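-- pv_equiv track=rewrite | github.com/ViktorcArmius/mini-ai-2019 | version_final.py | valid_turns
-- ===== SOURCE A (Python) =====
-- def reverse(turn): #возвращает обратный данному ход. нужен для исключения его из возможных
--     return { 'up':'down',
--              'down':'up',
--              'left':'right',
--              'right':'left',
--              None:'None',
--              'None':'None'}[turn]
--
-- def valid_turns(pos, prev = 'None', way = '',way_l = [],wx = 31, wy = 31): #выдаёт разрешенные ходы
--     turns = ['up','right','down','left']
--
--     up =    (pos[0],pos[1]+1)
--     down =  (pos[0],pos[1]-1)
--     left =  (pos[0]-1,pos[1])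
--     right = (pos[0]+1,pos[1])
--
--     if reverse(prev) in turns:       #убираем обратный ход
--         turns.remove(reverse(prev))
--
--     t_w = []
--     if way != []:                           #отсечение возможных ходов так, чтобы путь получался только прямоугольниками
--         if ('u' in way)and(way[-1]!='u'):
--             t_w.append('up')
--         if ('r' in way)and(way[-1]!='r'):
--             t_w.append('right')
--         if ('d' in way)and(way[-1]!='d'):
--             t_w.append('down')
--         if ('l' in way)and(way[-1]!='l'):
--             t_w.append('left')
--
--
--     if ('up' in turns)and((pos[1] == wy-1)or(up in way_l)):     #убираем ходы, ведущие за пределы карты и на свой хвост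
--         turns.remove('up')
--     if ('right' in turns)and((pos[0] == wx-1)or(right in way_l)):
--         turns.remove('right')
--     if ('down' in turns)and((pos[1] == 0)or(down in way_l)):
--         turns.remove('down')
--     if ('left' in turns)and((pos[0] == 0)or(left in way_l)):
--         turns.remove('left')
--
--     for turn in t_w:                   #убираем ходы, получаемые для отсечения
--         if turn in turns:
--             turns.remove(turn)
--
--     return turns
-- ===== SOURCE B (Python) =====
-- def reverse(turn): # same helper as the original module
--     return { 'up':'down',
--              'down':'up',
--              'left':'right',
--              'right':'left',
--              None:'None',
--              'None':'None'}[turn]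
--
-- # all 16 possible answers, precomputed once; bit 8/4/2/1 = up/right/down/left
-- _NAMES = ('up', 'right', 'down', 'left')
-- _TABLE = [[_NAMES[i] for i in range(4) if (m >> (3 - i)) & 1] for m in range(16)]
--
-- def valid_turns(pos, prev = 'None', way = '', way_l = [], wx = 31, wy = 31):
--     x, y = pos
--     rev = reverse(prev)
--     mask = 0
--     if rev != 'up' and y != wy - 1 and (x, y + 1) not in way_l and not ('u' in way and way[-1] != 'u'):
--         mask |= 8
--     if rev != 'right' and x != wx - 1 and (x + 1, y) not in way_l and not ('r' in way and way[-1] != 'r'):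
--         mask |= 4
--     if rev != 'down' and y != 0 and (x, y - 1) not in way_l and not ('d' in way and way[-1] != 'd'):
--         mask |= 2
--     if rev != 'left' and x != 0 and (x - 1, y) not in way_l and not ('l' in way and way[-1] != 'l'):
--         mask |= 1
--     return list(_TABLE[mask])
-- ===== Notes on version B (the rewrite author's own statement) =====
-- stated objective: alternative
-- what changed: A builds the answer by mutating a list through three staged rounds of conditional list.remove (reverse move, map edge/tail, then the t_w rectangle-cut pass); B never assembles a list per call: it folds all checks into a 4-bit admissibility mask and returns the matching entry of a static 16-row lookup table precomputed once at module load; Pre_ only excludes prev values outside reverse()'s keys, where both programs raise KeyError.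
import Mathlib
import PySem

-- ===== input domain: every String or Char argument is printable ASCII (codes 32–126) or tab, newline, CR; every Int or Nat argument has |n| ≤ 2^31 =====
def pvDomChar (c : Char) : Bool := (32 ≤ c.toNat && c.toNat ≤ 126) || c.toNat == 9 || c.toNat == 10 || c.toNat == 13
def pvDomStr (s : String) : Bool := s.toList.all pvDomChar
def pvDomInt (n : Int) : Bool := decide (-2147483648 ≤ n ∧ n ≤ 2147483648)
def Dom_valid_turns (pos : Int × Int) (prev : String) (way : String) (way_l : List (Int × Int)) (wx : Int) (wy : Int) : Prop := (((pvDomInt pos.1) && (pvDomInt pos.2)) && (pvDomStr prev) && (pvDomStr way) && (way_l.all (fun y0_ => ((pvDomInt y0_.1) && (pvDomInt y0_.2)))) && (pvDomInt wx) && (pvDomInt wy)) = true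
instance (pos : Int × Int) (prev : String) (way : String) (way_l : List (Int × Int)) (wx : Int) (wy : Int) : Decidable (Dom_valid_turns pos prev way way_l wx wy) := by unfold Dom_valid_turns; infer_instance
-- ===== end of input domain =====

-- B replaces A's three staged rounds of conditional list.remove by a 4-bit
-- admissibility mask indexing a precomputed 16-entry answer table (objective:
-- alternative); equal output on every prev that reverse() accepts (elsewhere
-- both Pythons raise KeyError).


-- ===== PORT A =====
-- reverse(): dict lookup; `none` is exactly Python's KeyError (excluded by Pre_).
-- (the Python dict's extra key `None` is unreachable: prev is a string here)
def pvReverse? (turn : String) : Option String :=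
  (PySem.Dict.ofList
    [("up","down"),("down","up"),("left","right"),("right","left"),("None","None")]).get? turn

def valid_turns (pos : Int × Int) (prev : String) (way : String) (way_l : List (Int × Int)) (wx : Int) (wy : Int) : List String :=
  let turns : List String := ["up", "right", "down", "left"]
  let up    := (pos.1, pos.2 + 1)
  let down  := (pos.1, pos.2 - 1)
  let left  := (pos.1 - 1, pos.2)
  let right := (pos.1 + 1, pos.2)
  -- reverse(prev); the `getD` arm is unreachable under Pre_ (Python raises KeyError there)
  let rev := (pvReverse? prev).getD "KeyError"
  let turns := if rev ∈ turns then turns.erase rev else turns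
  let t_w : List String := []
  -- Python's `way != []` compares a str with a list and is always True; branch always taken
  let t_w := if PySem.Str.isIn "u" way = true ∧ PySem.Str.pyGet? way (-1) ≠ some 'u' then t_w ++ ["up"] else t_w
  let t_w := if PySem.Str.isIn "r" way = true ∧ PySem.Str.pyGet? way (-1) ≠ some 'r' then t_w ++ ["right"] else t_w
  let t_w := if PySem.Str.isIn "d" way = true ∧ PySem.Str.pyGet? way (-1) ≠ some 'd' then t_w ++ ["down"] else t_w
  let t_w := if PySem.Str.isIn "l" way = true ∧ PySem.Str.pyGet? way (-1) ≠ some 'l' then t_w ++ ["left"] else t_w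
  let turns := if "up" ∈ turns ∧ (pos.2 = wy - 1 ∨ up ∈ way_l) then turns.erase "up" else turns
  let turns := if "right" ∈ turns ∧ (pos.1 = wx - 1 ∨ right ∈ way_l) then turns.erase "right" else turns
  let turns := if "down" ∈ turns ∧ (pos.2 = 0 ∨ down ∈ way_l) then turns.erase "down" else turns
  let turns := if "left" ∈ turns ∧ (pos.1 = 0 ∨ left ∈ way_l) then turns.erase "left" else turns
  t_w.foldl (fun ts t => if t ∈ ts then ts.erase t else ts) turns

-- ===== PORT B =====
-- B's module-level precomputed table: _TABLE[m] lists the names whose bit is set in m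
def pvNames : List String := ["up", "right", "down", "left"]
def pvTable : List (List String) :=
  (List.range 16).map (fun m =>
    (List.range 4).filterMap (fun i =>
      if (m >>> (3 - i)) &&& 1 ≠ 0 then pvNames[i]? else none))

def valid_turns_alt (pos : Int × Int) (prev : String) (way : String) (way_l : List (Int × Int)) (wx : Int) (wy : Int) : List String :=
  let x := pos.1
  let y := pos.2
  let rev := (pvReverse? prev).getD "KeyError"   -- unreachable arm: KeyError excluded by Pre_
  let mask : Nat := 0
  let mask := if rev ≠ "up" ∧ ¬ y = wy - 1 ∧ (x, y + 1) ∉ way_l ∧ ¬ (PySem.Str.isIn "u" way = true ∧ PySem.Str.pyGet? way (-1) ≠ some 'u') then mask ||| 8 else mask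
  let mask := if rev ≠ "right" ∧ ¬ x = wx - 1 ∧ (x + 1, y) ∉ way_l ∧ ¬ (PySem.Str.isIn "r" way = true ∧ PySem.Str.pyGet? way (-1) ≠ some 'r') then mask ||| 4 else mask
  let mask := if rev ≠ "down" ∧ ¬ y = 0 ∧ (x, y - 1) ∉ way_l ∧ ¬ (PySem.Str.isIn "d" way = true ∧ PySem.Str.pyGet? way (-1) ≠ some 'd') then mask ||| 2 else mask
  let mask := if rev ≠ "left" ∧ ¬ x = 0 ∧ (x - 1, y) ∉ way_l ∧ ¬ (PySem.Str.isIn "l" way = true ∧ PySem.Str.pyGet? way (-1) ≠ some 'l') then mask ||| 1 else mask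
  -- list(_TABLE[mask]); mask < 16 always, so the default is unreachable
  pvTable.getD mask []

-- ===== PRECONDITION & SPEC =====
-- Pre_ excludes exactly the prev values on which reverse() raises KeyError (both A and B raise there).
def Pre_valid_turns (pos : Int × Int) (prev : String) (way : String) (way_l : List (Int × Int)) (wx : Int) (wy : Int) : Prop :=
  prev = "up" ∨ prev = "down" ∨ prev = "left" ∨ prev = "right" ∨ prev = "None"
instance (pos : Int × Int) (prev : String) (way : String) (way_l : List (Int × Int)) (wx : Int) (wy : Int) : Decidable (Pre_valid_turns pos prev way way_l wx wy) := by unfold Pre_valid_turns; infer_instance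
def pvWitness_valid_turns : (Int × Int) × String × String × (List (Int × Int)) × Int × Int := ((3, 3), "up", "ur", [(3, 4)], 31, 31)
def Spec_valid_turns (pos : Int × Int) (prev : String) (way : String) (way_l : List (Int × Int)) (wx : Int) (wy : Int) (out : List String) : Prop := out = valid_turns_alt pos prev way way_l wx wy
instance (pos : Int × Int) (prev : String) (way : String) (way_l : List (Int × Int)) (wx : Int) (wy : Int) (out : List String) : Decidable (Spec_valid_turns pos prev way way_l wx wy out) := by unfold Spec_valid_turns; infer_instance

-- ===== CLAIM (what is proved, stated in full; the proofs are below) =====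
def Claim_equal_valid_turns : Prop := ∀ (pos : Int × Int) (prev : String) (way : String) (way_l : List (Int × Int)) (wx : Int) (wy : Int), Dom_valid_turns pos prev way way_l wx wy → Pre_valid_turns pos prev way way_l wx wy → Spec_valid_turns pos prev way way_l wx wy (valid_turns pos prev way way_l wx wy)

-- ===== LEMMAS AND PROOFS =====
-- Proof-side models: both pipelines with the twelve data-dependent conditions abstracted to Bools
-- (per direction: e = at map edge, m = neighbour on the tail, t = rectangle-cut letter fires).
def pvPipeA (rev : String) (eU mU eR mR eD mD eL mL tU tR tD tL : Bool) : List String :=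
  let turns : List String := ["up", "right", "down", "left"]
  let turns := if rev ∈ turns then turns.erase rev else turns
  let t_w : List String := []
  let t_w := if tU then t_w ++ ["up"] else t_w
  let t_w := if tR then t_w ++ ["right"] else t_w
  let t_w := if tD then t_w ++ ["down"] else t_w
  let t_w := if tL then t_w ++ ["left"] else t_w
  let turns := if "up" ∈ turns ∧ (eU = true ∨ mU = true) then turns.erase "up" else turns
  let turns := if "right" ∈ turns ∧ (eR = true ∨ mR = true) then turns.erase "right" else turns
  let turns := if "down" ∈ turns ∧ (eD = true ∨ mD = true) then turns.erase "down" else turns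
  let turns := if "left" ∈ turns ∧ (eL = true ∨ mL = true) then turns.erase "left" else turns
  t_w.foldl (fun ts t => if t ∈ ts then ts.erase t else ts) turns

def pvPipeB (rev : String) (eU mU eR mR eD mD eL mL tU tR tD tL : Bool) : List String :=
  let mask : Nat := 0
  let mask := if rev ≠ "up" ∧ ¬ eU = true ∧ ¬ mU = true ∧ ¬ tU = true then mask ||| 8 else mask
  let mask := if rev ≠ "right" ∧ ¬ eR = true ∧ ¬ mR = true ∧ ¬ tR = true then mask ||| 4 else mask
  let mask := if rev ≠ "down" ∧ ¬ eD = true ∧ ¬ mD = true ∧ ¬ tD = true then mask ||| 2 else mask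
  let mask := if rev ≠ "left" ∧ ¬ eL = true ∧ ¬ mL = true ∧ ¬ tL = true then mask ||| 1 else mask
  pvTable.getD mask []

theorem pvPipe_eq : ∀ rev ∈ (["down", "up", "right", "left", "None"] : List String),
    ∀ (eU mU eR mR eD mD eL mL tU tR tD tL : Bool),
    pvPipeA rev eU mU eR mR eD mD eL mL tU tR tD tL =
      pvPipeB rev eU mU eR mR eD mD eL mL tU tR tD tL := by decide

theorem pvA_eq_pipe (pos : Int × Int) (prev : String) (way : String) (way_l : List (Int × Int)) (wx : Int) (wy : Int) :
    valid_turns pos prev way way_l wx wy =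
      pvPipeA ((pvReverse? prev).getD "KeyError")
        (decide (pos.2 = wy - 1)) (decide ((pos.1, pos.2 + 1) ∈ way_l))
        (decide (pos.1 = wx - 1)) (decide ((pos.1 + 1, pos.2) ∈ way_l))
        (decide (pos.2 = 0)) (decide ((pos.1, pos.2 - 1) ∈ way_l))
        (decide (pos.1 = 0)) (decide ((pos.1 - 1, pos.2) ∈ way_l))
        (decide (PySem.Str.isIn "u" way = true ∧ PySem.Str.pyGet? way (-1) ≠ some 'u'))
        (decide (PySem.Str.isIn "r" way = true ∧ PySem.Str.pyGet? way (-1) ≠ some 'r'))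
        (decide (PySem.Str.isIn "d" way = true ∧ PySem.Str.pyGet? way (-1) ≠ some 'd'))
        (decide (PySem.Str.isIn "l" way = true ∧ PySem.Str.pyGet? way (-1) ≠ some 'l')) := by
  simp only [valid_turns, pvPipeA, decide_eq_true_eq]

theorem pvB_eq_pipe (pos : Int × Int) (prev : String) (way : String) (way_l : List (Int × Int)) (wx : Int) (wy : Int) :
    valid_turns_alt pos prev way way_l wx wy =
      pvPipeB ((pvReverse? prev).getD "KeyError")
        (decide (pos.2 = wy - 1)) (decide ((pos.1, pos.2 + 1) ∈ way_l))
        (decide (pos.1 = wx - 1)) (decide ((pos.1 + 1, pos.2) ∈ way_l))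
        (decide (pos.2 = 0)) (decide ((pos.1, pos.2 - 1) ∈ way_l))
        (decide (pos.1 = 0)) (decide ((pos.1 - 1, pos.2) ∈ way_l))
        (decide (PySem.Str.isIn "u" way = true ∧ PySem.Str.pyGet? way (-1) ≠ some 'u'))
        (decide (PySem.Str.isIn "r" way = true ∧ PySem.Str.pyGet? way (-1) ≠ some 'r'))
        (decide (PySem.Str.isIn "d" way = true ∧ PySem.Str.pyGet? way (-1) ≠ some 'd'))
        (decide (PySem.Str.isIn "l" way = true ∧ PySem.Str.pyGet? way (-1) ≠ some 'l')) := by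
  simp only [valid_turns_alt, pvPipeB, decide_eq_true_eq, ne_eq]

-- ===== VERDICT (by name: the statement is the Claim_ definition above) =====
theorem valid_turns_spec : Claim_equal_valid_turns := by
  intro pos prev way way_l wx wy _ hpre
  unfold Spec_valid_turns
  have hrev : ((pvReverse? prev).getD "KeyError") ∈ (["down", "up", "right", "left", "None"] : List String) := by
    rcases hpre with h | h | h | h | h <;> subst h <;> decide
  rw [pvA_eq_pipe, pvB_eq_pipe]
  exact pvPipe_eq _ hrev _ _ _ _ _ _ _ _ _ _ _ _
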